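-- pv_equiv track=rewrite | github.com/Se3as/Geneticaust | DPMultiKnapsack.py | DPMultiKnapsack
-- ===== SOURCE A (Python) =====
-- def DPMultiKnapsack(items, weight, volume, price, capacity_w, capacity_v):
--   elements = len(items)
--   dp = [[0] * (capacity_v + 1) for _ in range(capacity_w + 1)]
--
--   # Create a 2d matrix to store the maximum price
--   for i in range(elements):
--     for w in range(capacity_w, weight[i] - 1, -1):
--       for v in range(capacity_v, volume[i] - 1, -1):
--         if w >= weight[i] and v >= volume[i]:
--           dp[w][v] = max(dp[w][v], dp[w - weight[i]][v - volume[i]] + price[i])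
--   return dp[capacity_w][capacity_v]
-- ===== SOURCE B (Python) =====
-- def DPMultiKnapsack(items, weight, volume, price, capacity_w, capacity_v):
--   # Sparse DP over reachable states: map each achievable exact (weight, volume)
--   # total of a fitting subset to the best price for that total.
--   best = {(0, 0): 0}
--   for i in range(len(items)):
--     wt = weight[i]
--     if wt > capacity_w:
--       continue  # can never be taken
--     vl = volume[i]
--     if vl > capacity_v:
--       continue  # can never be taken
--     pr = price[i]
--     for (tw, tv), p in list(best.items()):
--       nw = tw + wt
--       nv = tv + vl
--       if nw <= capacity_w and nv <= capacity_v: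
--         q = p + pr
--         if (nw, nv) not in best or best[(nw, nv)] < q:
--           best[(nw, nv)] = q
--   return max(best.values())
-- ===== Notes on version B (the rewrite author's own statement) =====
-- stated objective: alternative
-- what changed: Replaces the bottom-up in-place (capacity_w+1)x(capacity_v+1) table swept in reverse order per item by a forward sparse DP that keeps a dict mapping each reachable exact (weight,volume) total to the best price achieving it, and returns the max of the dict values.
import Mathlib
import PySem

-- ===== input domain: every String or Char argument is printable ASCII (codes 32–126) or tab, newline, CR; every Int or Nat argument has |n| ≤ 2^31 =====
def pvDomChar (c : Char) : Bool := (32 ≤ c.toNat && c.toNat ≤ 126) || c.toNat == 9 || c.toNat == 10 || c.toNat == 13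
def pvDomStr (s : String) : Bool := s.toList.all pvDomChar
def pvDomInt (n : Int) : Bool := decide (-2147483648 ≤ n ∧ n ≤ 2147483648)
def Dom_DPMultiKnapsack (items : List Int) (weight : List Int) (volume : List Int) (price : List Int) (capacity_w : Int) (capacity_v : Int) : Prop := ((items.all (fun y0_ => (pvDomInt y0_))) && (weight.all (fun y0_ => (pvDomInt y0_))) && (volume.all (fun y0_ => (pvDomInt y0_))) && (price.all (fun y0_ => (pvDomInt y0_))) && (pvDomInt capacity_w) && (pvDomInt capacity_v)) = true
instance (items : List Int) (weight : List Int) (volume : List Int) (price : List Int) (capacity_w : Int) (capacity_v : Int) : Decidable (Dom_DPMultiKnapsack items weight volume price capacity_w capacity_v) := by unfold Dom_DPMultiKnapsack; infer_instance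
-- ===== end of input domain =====

-- B replaces A's bottom-up in-place 2D table (reverse sweeps per item) by a forward sparse
-- DP over a dict of reachable exact (weight, volume) totals; equivalence is proved on Pre_,
-- which holds exactly on the inputs where the Python A returns (no IndexError).

-- ===== PORT A =====
-- dp is Python's list-of-lists; Pre_ excludes exactly the inputs where Python's indexing
-- would raise IndexError, and on Pre_ every index is nonnegative and in range, so the
-- getD/toNat reads below are exact.
def pvGet (dp : List (List Int)) (w v : Int) : Int := (dp.getD w.toNat []).getD v.toNat 0

-- 'dp[w][v] = x'
def pvSet (dp : List (List Int)) (w v x : Int) : List (List Int) :=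
  dp.set w.toNat ((dp.getD w.toNat []).set v.toNat x)

-- body of the innermost 'for v' loop ('if w >= weight[i] and v >= volume[i]: dp[w][v] = max(...)')
def pvInnerA (a b p w : Int) (dp : List (List Int)) (v : Int) : List (List Int) :=
  if a ≤ w ∧ b ≤ v then pvSet dp w v (max (pvGet dp w v) (pvGet dp (w - a) (v - b) + p)) else dp

-- 'for v in range(capacity_v, volume[i] - 1, -1)'
def pvRowA (cv a b p : Int) (dp : List (List Int)) (w : Int) : List (List Int) :=
  (PySem.List.pyRange cv (b - 1) (-1)).foldl (pvInnerA a b p w) dp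

-- 'for w in range(capacity_w, weight[i] - 1, -1)'
def pvItemA (cw cv a b p : Int) (dp : List (List Int)) : List (List Int) :=
  (PySem.List.pyRange cw (a - 1) (-1)).foldl (pvRowA cv a b p) dp

def DPMultiKnapsack (items : List Int) (weight : List Int) (volume : List Int) (price : List Int) (capacity_w : Int) (capacity_v : Int) : Int :=
  let elements : Int := (items.length : Int)
  let dp : List (List Int) := List.replicate (capacity_w + 1).toNat (List.replicate (capacity_v + 1).toNat 0)
  let dp := (PySem.List.pyRange 0 elements 1).foldl
    (fun dp i => pvItemA capacity_w capacity_v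
      (PySem.List.pyGetD weight i 0) (PySem.List.pyGetD volume i 0) (PySem.List.pyGetD price i 0) dp)
    dp
  pvGet dp capacity_w capacity_v

-- ===== PORT B =====
-- body of 'for (tw, tv), p in list(best.items())'
def pvStepB (cw cv wt vl pr : Int) (b : PySem.Dict (Int × Int) Int) (e : (Int × Int) × Int) : PySem.Dict (Int × Int) Int :=
  if e.1.1 + wt ≤ cw ∧ e.1.2 + vl ≤ cv then
    match b.get? (e.1.1 + wt, e.1.2 + vl) with
    | none => b.insert (e.1.1 + wt, e.1.2 + vl) (e.2 + pr)
    | some old => if old < e.2 + pr then b.insert (e.1.1 + wt, e.1.2 + vl) (e.2 + pr) else b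
  else b

-- one iteration of 'for i in range(len(items))' (with the two 'continue' guards)
def pvItemB (cw cv : Int) (weight volume price : List Int) (best : PySem.Dict (Int × Int) Int) (i : Int) : PySem.Dict (Int × Int) Int :=
  let wt := PySem.List.pyGetD weight i 0
  if cw < wt then best
  else
    let vl := PySem.List.pyGetD volume i 0
    if cv < vl then best
    else
      let pr := PySem.List.pyGetD price i 0
      best.items.foldl (pvStepB cw cv wt vl pr) best

def DPMultiKnapsack_alt (items : List Int) (weight : List Int) (volume : List Int) (price : List Int) (capacity_w : Int) (capacity_v : Int) : Int :=
  let best : PySem.Dict (Int × Int) Int := PySem.Dict.ofList [((0, 0), 0)]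
  let best := (PySem.List.pyRange 0 (items.length : Int) 1).foldl
    (pvItemB capacity_w capacity_v weight volume price) best
  -- best.values() is never empty ((0,0) is always a key), so Python's max never raises
  (PySem.List.max? best.values id).getD 0

-- ===== PRECONDITION & SPEC =====
-- Pre_ holds exactly where the Python A returns: capacities nonnegative, and per item the
-- lists A actually indexes are long enough, with weight/volume nonnegative whenever the item
-- reaches the table update (a negative weight or volume there makes A read past the table).
def Pre_DPMultiKnapsack (items : List Int) (weight : List Int) (volume : List Int) (price : List Int) (capacity_w : Int) (capacity_v : Int) : Prop :=
  0 ≤ capacity_w ∧ 0 ≤ capacity_v ∧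
  ∀ i < items.length,
    i < weight.length ∧
    (weight.getD i 0 ≤ capacity_w →
      (i < volume.length ∧
        (volume.getD i 0 ≤ capacity_v →
          (i < price.length ∧ 0 ≤ weight.getD i 0 ∧ 0 ≤ volume.getD i 0))))
instance (items : List Int) (weight : List Int) (volume : List Int) (price : List Int) (capacity_w : Int) (capacity_v : Int) : Decidable (Pre_DPMultiKnapsack items weight volume price capacity_w capacity_v) := by unfold Pre_DPMultiKnapsack; infer_instance

def pvWitness_DPMultiKnapsack : List Int × List Int × List Int × List Int × Int × Int :=
  ([10, 20, 30], [1, 2, 3], [1, 1, 2], [3, 4, 6], 3, 2)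

def Spec_DPMultiKnapsack (items : List Int) (weight : List Int) (volume : List Int) (price : List Int) (capacity_w : Int) (capacity_v : Int) (out : Int) : Prop := out = DPMultiKnapsack_alt items weight volume price capacity_w capacity_v
instance (items : List Int) (weight : List Int) (volume : List Int) (price : List Int) (capacity_w : Int) (capacity_v : Int) (out : Int) : Decidable (Spec_DPMultiKnapsack items weight volume price capacity_w capacity_v out) := by unfold Spec_DPMultiKnapsack; infer_instance

-- ===== CLAIM (what is proved, stated in full; the proofs are below) =====
def Claim_equal_DPMultiKnapsack : Prop := ∀ (items : List Int) (weight : List Int) (volume : List Int) (price : List Int) (capacity_w : Int) (capacity_v : Int), Dom_DPMultiKnapsack items weight volume price capacity_w capacity_v → Pre_DPMultiKnapsack items weight volume price capacity_w capacity_v → Spec_DPMultiKnapsack items weight volume price capacity_w capacity_v (DPMultiKnapsack items weight volume price capacity_w capacity_v)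

-- ===== LEMMAS AND PROOFS =====

theorem pvWitness_ok :
    Dom_DPMultiKnapsack (pvWitness_DPMultiKnapsack.1) (pvWitness_DPMultiKnapsack.2.1) (pvWitness_DPMultiKnapsack.2.2.1) (pvWitness_DPMultiKnapsack.2.2.2.1) (pvWitness_DPMultiKnapsack.2.2.2.2.1) (pvWitness_DPMultiKnapsack.2.2.2.2.2) ∧
    Pre_DPMultiKnapsack (pvWitness_DPMultiKnapsack.1) (pvWitness_DPMultiKnapsack.2.1) (pvWitness_DPMultiKnapsack.2.2.1) (pvWitness_DPMultiKnapsack.2.2.2.1) (pvWitness_DPMultiKnapsack.2.2.2.2.1) (pvWitness_DPMultiKnapsack.2.2.2.2.2) := by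
  decide

-- ---- generic max-fold helpers (about the fold pvMvle uses) ----
theorem pvFoldMax_base_le {α : Type} (l : List α) (f : α → Int) (m : Int) :
    m ≤ l.foldl (fun m c => max m (f c)) m := by
  induction l generalizing m with
  | nil => simp
  | cons c t ih => exact le_trans (le_max_left _ _) (ih (max m (f c)))

theorem pvFoldMax_le_of_mem {α : Type} {l : List α} {c : α} (hc : c ∈ l) (f : α → Int) (m : Int) :
    f c ≤ l.foldl (fun m c => max m (f c)) m := by
  induction l generalizing m with
  | nil => simp at hc
  | cons a t ih =>
    rcases List.mem_cons.mp hc with h | h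
    · subst h; exact le_trans (le_max_right _ _) (pvFoldMax_base_le t f _)
    · exact ih h _

theorem pvFoldMax_le {α : Type} {l : List α} {f : α → Int} {m M : Int}
    (hm : m ≤ M) (h : ∀ c ∈ l, f c ≤ M) : l.foldl (fun m c => max m (f c)) m ≤ M := by
  induction l generalizing m with
  | nil => simpa
  | cons a t ih =>
    exact ih (max_le hm (h a (List.mem_cons_self))) (fun c hc => h c (List.mem_cons_of_mem _ hc))

theorem pvFoldMax_attained {α : Type} (l : List α) (f : α → Int) (m : Int) :
    l.foldl (fun m c => max m (f c)) m = m ∨ ∃ c ∈ l, l.foldl (fun m c => max m (f c)) m = f c := by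
  induction l generalizing m with
  | nil => exact Or.inl rfl
  | cons a t ih =>
    rcases ih (max m (f a)) with h | h
    · simp only [List.foldl_cons] at *
      rcases max_cases m (f a) with ⟨he, _⟩ | ⟨he, _⟩
      · exact Or.inl (by rw [h, he])
      · exact Or.inr ⟨a, List.mem_cons_self, by rw [h, he]⟩
    · obtain ⟨c, hc, he⟩ := h
      exact Or.inr ⟨c, List.mem_cons_of_mem _ hc, he⟩

-- ---- the cell grid and the dict-as-table reading ----
def pvCells (w v : Int) : List (Int × Int) :=
  (PySem.List.pyRange 0 (w + 1) 1).flatMap (fun x => (PySem.List.pyRange 0 (v + 1) 1).map (fun y => (x, y)))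

theorem pvMem_cells {w v : Int} {c : Int × Int} :
    c ∈ pvCells w v ↔ 0 ≤ c.1 ∧ c.1 ≤ w ∧ 0 ≤ c.2 ∧ c.2 ≤ v := by
  obtain ⟨x, y⟩ := c
  simp [pvCells, List.mem_flatMap, PySem.List.mem_pyRange_one]
  omega

def pvMvle (d : PySem.Dict (Int × Int) Int) (w v : Int) : Int :=
  (pvCells w v).foldl (fun m c => max m (d.getD c 0)) 0

-- ---- table shape and read/write lemmas ----
def pvShape (cw cv : Int) (dp : List (List Int)) : Prop :=
  dp.length = (cw + 1).toNat ∧ ∀ r ∈ dp, r.length = (cv + 1).toNat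

theorem pvRow_len (cw cv : Int) (dp : List (List Int)) (hsh : pvShape cw cv dp) (w : Int)
    (hw0 : 0 ≤ w) (hwc : w ≤ cw) : (dp.getD w.toNat []).length = (cv + 1).toNat := by
  have hlt : w.toNat < dp.length := by rw [hsh.1]; omega
  have hrow : dp.getD w.toNat [] = dp[w.toNat] := by
    rw [List.getD_eq_getElem?_getD, List.getElem?_eq_getElem hlt]
    rfl
  rw [hrow]
  exact hsh.2 _ (List.getElem_mem hlt)

theorem pvShape_set (cw cv : Int) (dp : List (List Int)) (hsh : pvShape cw cv dp) (w v x : Int)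
    (hw0 : 0 ≤ w) (hwc : w ≤ cw) : pvShape cw cv (pvSet dp w v x) := by
  refine ⟨by simpa [pvSet] using hsh.1, ?_⟩
  intro r hr
  rcases List.mem_or_eq_of_mem_set hr with hr | hr
  · exact hsh.2 r hr
  · subst hr
    rw [List.length_set]
    exact pvRow_len cw cv dp hsh w hw0 hwc

theorem pvGet_set (cw cv : Int) (dp : List (List Int)) (hsh : pvShape cw cv dp)
    (w v x x' y' : Int) (hw0 : 0 ≤ w) (hwc : w ≤ cw) (hv0 : 0 ≤ v) (hvc : v ≤ cv)
    (hx0 : 0 ≤ x') (hy0 : 0 ≤ y') :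
    pvGet (pvSet dp w v x) x' y' = if x' = w ∧ y' = v then x else pvGet dp x' y' := by
  have hwlt : w.toNat < dp.length := by rw [hsh.1]; omega
  have hvlt : v.toNat < (dp.getD w.toNat []).length := by
    rw [pvRow_len cw cv dp hsh w hw0 hwc]; omega
  unfold pvGet pvSet
  rw [List.getD_eq_getElem?_getD (l := dp.set w.toNat ((dp.getD w.toNat []).set v.toNat x)) (i := x'.toNat),
      List.getElem?_set]
  by_cases hww : w.toNat = x'.toNat
  · have hxw : x' = w := by omega
    rw [if_pos hww, if_pos hwlt]
    simp only [Option.getD_some]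
    rw [List.getD_eq_getElem?_getD (l := (dp.getD w.toNat []).set v.toNat x) (i := y'.toNat),
        List.getElem?_set]
    by_cases hvv : v.toNat = y'.toNat
    · have hyv : y' = v := by omega
      rw [if_pos hvv, if_pos hvlt]
      simp only [Option.getD_some]
      rw [if_pos ⟨hxw, hyv⟩]
    · have hne : ¬(x' = w ∧ y' = v) := by omega
      rw [if_neg hvv, if_neg hne, ← List.getD_eq_getElem?_getD]
      rw [show x'.toNat = w.toNat from hww.symm]
    -- (the read lands back in the same, untouched row)
  · have hne : ¬(x' = w ∧ y' = v) := by omega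
    rw [if_neg hww, if_neg hne, ← List.getD_eq_getElem?_getD]

-- ---- characterisation of A's two reverse capacity sweeps ----
theorem pvFoldl_const {α β : Type} (l : List α) (x : β) : l.foldl (fun acc _ => acc) x = x := by
  induction l with
  | nil => rfl
  | cons a t ih => simpa using ih

theorem pvRowA_char (cw cv a b p w : Int) (ha : 0 ≤ a) (hb : 0 ≤ b) (haw : a ≤ w)
    (hwc : w ≤ cw) :
    ∀ (n : Nat) (hi : Int), hi ≤ cv → (hi + 1 - b).toNat = n → ∀ dp, pvShape cw cv dp →
      pvShape cw cv ((PySem.List.pyRange hi (b - 1) (-1)).foldl (pvInnerA a b p w) dp) ∧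
      ∀ x y, 0 ≤ x → 0 ≤ y →
        pvGet ((PySem.List.pyRange hi (b - 1) (-1)).foldl (pvInnerA a b p w) dp) x y
          = if x = w ∧ b ≤ y ∧ y ≤ hi then max (pvGet dp w y) (pvGet dp (w - a) (y - b) + p)
            else pvGet dp x y := by
  have hw0 : 0 ≤ w := by omega
  intro n
  induction n with
  | zero =>
    intro hi hicv hn dp hsh
    rw [PySem.List.pyRange_neg_one_eq_nil (by omega)]
    refine ⟨hsh, ?_⟩
    intro x y hx0 hy0
    simp only [List.foldl_nil]
    rw [if_neg (by omega)]
  | succ n ih =>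
    intro hi hicv hn dp hsh
    rw [PySem.List.pyRange_neg_one_cons (by omega), List.foldl_cons]
    have hbhi : b ≤ hi := by omega
    have hstep : pvInnerA a b p w dp hi
        = pvSet dp w hi (max (pvGet dp w hi) (pvGet dp (w - a) (hi - b) + p)) := by
      simp only [pvInnerA, if_pos (show a ≤ w ∧ b ≤ hi from ⟨haw, hbhi⟩)]
    have hsh1 : pvShape cw cv (pvSet dp w hi (max (pvGet dp w hi) (pvGet dp (w - a) (hi - b) + p))) :=
      pvShape_set cw cv dp hsh _ _ _ hw0 hwc
    obtain ⟨hshout, hout⟩ := ih (hi - 1) (by omega) (by omega) _ hsh1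
    rw [hstep]
    refine ⟨hshout, ?_⟩
    intro x y hx0 hy0
    rw [hout x y hx0 hy0]
    by_cases hxw : x = w ∧ b ≤ y ∧ y ≤ hi - 1
    · rw [if_pos hxw, if_pos (show x = w ∧ b ≤ y ∧ y ≤ hi by omega)]
      rw [pvGet_set cw cv dp hsh w hi _ w y hw0 hwc (by omega) hicv hw0 (by omega),
          if_neg (by omega),
          pvGet_set cw cv dp hsh w hi _ (w - a) (y - b) hw0 hwc (by omega) hicv (by omega) (by omega),
          if_neg (by omega)]
    · rw [if_neg hxw]
      by_cases hk : x = w ∧ y = hi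
      · obtain ⟨hx1, hy1⟩ := hk; subst hx1; subst hy1
        rw [pvGet_set cw cv dp hsh x y _ x y hw0 hwc (by omega) hicv hx0 hy0,
            if_pos ⟨rfl, rfl⟩, if_pos (show x = x ∧ b ≤ y ∧ y ≤ y from by omega)]
      · rw [pvGet_set cw cv dp hsh w hi _ x y hw0 hwc (by omega) hicv hx0 hy0,
            if_neg hk, if_neg (by omega)]

theorem pvItemA_char (cw cv a b p : Int) (ha : 0 ≤ a) (hb : 0 ≤ b) :
    ∀ (n : Nat) (hiw : Int), hiw ≤ cw → (hiw + 1 - a).toNat = n → ∀ dp, pvShape cw cv dp →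
      pvShape cw cv ((PySem.List.pyRange hiw (a - 1) (-1)).foldl (pvRowA cv a b p) dp) ∧
      ∀ x y, 0 ≤ x → 0 ≤ y →
        pvGet ((PySem.List.pyRange hiw (a - 1) (-1)).foldl (pvRowA cv a b p) dp) x y
          = if a ≤ x ∧ x ≤ hiw ∧ b ≤ y ∧ y ≤ cv then max (pvGet dp x y) (pvGet dp (x - a) (y - b) + p)
            else pvGet dp x y := by
  intro n
  induction n with
  | zero =>
    intro hiw hiwc hn dp hsh
    rw [PySem.List.pyRange_neg_one_eq_nil (by omega)]
    refine ⟨hsh, ?_⟩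
    intro x y hx0 hy0
    simp only [List.foldl_nil]
    rw [if_neg (by omega)]
  | succ n ih =>
    intro hiw hiwc hn dp hsh
    rw [PySem.List.pyRange_neg_one_cons (by omega), List.foldl_cons]
    have hahiw : a ≤ hiw := by omega
    obtain ⟨hsh1, hrow⟩ := pvRowA_char cw cv a b p hiw ha hb hahiw hiwc
      (cv + 1 - b).toNat cv (le_refl cv) rfl dp hsh
    have hrowA : (PySem.List.pyRange cv (b - 1) (-1)).foldl (pvInnerA a b p hiw) dp
        = pvRowA cv a b p dp hiw := rfl
    rw [hrowA] at hrow hsh1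
    obtain ⟨hshout, hout⟩ := ih (hiw - 1) (by omega) (by omega) _ hsh1
    refine ⟨hshout, ?_⟩
    intro x y hx0 hy0
    rw [hout x y hx0 hy0]
    by_cases hx : a ≤ x ∧ x ≤ hiw - 1 ∧ b ≤ y ∧ y ≤ cv
    · rw [if_pos hx, if_pos (show a ≤ x ∧ x ≤ hiw ∧ b ≤ y ∧ y ≤ cv by omega)]
      rw [hrow x y hx0 hy0, if_neg (by omega),
          hrow (x - a) (y - b) (by omega) (by omega), if_neg (by omega)]
    · rw [if_neg hx]
      by_cases hk : x = hiw ∧ b ≤ y ∧ y ≤ cv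
      · obtain ⟨hx1, hy1, hy2⟩ := hk; subst hx1
        rw [hrow x y hx0 hy0, if_pos ⟨rfl, hy1, hy2⟩,
            if_pos (show a ≤ x ∧ x ≤ x ∧ b ≤ y ∧ y ≤ cv by omega)]
      · rw [hrow x y hx0 hy0, if_neg hk, if_neg (by omega)]

theorem pvItemA_formula (cw cv a b p : Int)
    (hG : (a ≤ cw ∧ b ≤ cv) → (0 ≤ a ∧ 0 ≤ b)) (dp : List (List Int)) (hsh : pvShape cw cv dp) :
    pvShape cw cv (pvItemA cw cv a b p dp) ∧
    ∀ x y, 0 ≤ x → x ≤ cw → 0 ≤ y → y ≤ cv →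
      pvGet (pvItemA cw cv a b p dp) x y
        = if a ≤ x ∧ b ≤ y then max (pvGet dp x y) (pvGet dp (x - a) (y - b) + p)
          else pvGet dp x y := by
  by_cases hmain : a ≤ cw ∧ b ≤ cv
  · obtain ⟨ha, hb⟩ := hG hmain
    obtain ⟨hshout, hout⟩ := pvItemA_char cw cv a b p ha hb (cw + 1 - a).toNat cw (le_refl cw) rfl dp hsh
    refine ⟨hshout, ?_⟩
    intro x y hx0 hxc hy0 hyc
    rw [show pvItemA cw cv a b p dp
        = (PySem.List.pyRange cw (a - 1) (-1)).foldl (pvRowA cv a b p) dp from rfl,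
        hout x y hx0 hy0]
    by_cases hg : a ≤ x ∧ b ≤ y
    · rw [if_pos (show a ≤ x ∧ x ≤ cw ∧ b ≤ y ∧ y ≤ cv by omega), if_pos hg]
    · rw [if_neg (show ¬(a ≤ x ∧ x ≤ cw ∧ b ≤ y ∧ y ≤ cv) by omega), if_neg hg]
  · by_cases hacw : a ≤ cw
    · -- cv < b : every inner range is empty, the item is a no-op
      have hrow : ∀ (dp' : List (List Int)) (w' : Int), pvRowA cv a b p dp' w' = dp' := by
        intro dp' w'
        rw [pvRowA, PySem.List.pyRange_neg_one_eq_nil (by omega)]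
        rfl
      have hid : pvItemA cw cv a b p dp = dp := by
        rw [pvItemA]
        have : (PySem.List.pyRange cw (a - 1) (-1)).foldl (pvRowA cv a b p) dp
            = (PySem.List.pyRange cw (a - 1) (-1)).foldl (fun acc _ => acc) dp := by
          congr 1
          funext dp' w'
          exact hrow dp' w'
        rw [this, pvFoldl_const]
      rw [hid]
      refine ⟨hsh, ?_⟩
      intro x y hx0 hxc hy0 hyc
      rw [if_neg (by omega)]
    · -- cw < a : the outer range is empty
      have hid : pvItemA cw cv a b p dp = dp := by
        rw [pvItemA, PySem.List.pyRange_neg_one_eq_nil (by omega)]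
        rfl
      rw [hid]
      refine ⟨hsh, ?_⟩
      intro x y hx0 hxc hy0 hyc
      rw [if_neg (by omega)]

-- ---- characterisation of B's snapshot sweep ----
theorem pvInnerB_char (cw cv wt vl pr : Int) :
    ∀ (s : List ((Int × Int) × Int)) (bd : PySem.Dict (Int × Int) Int),
      (s.map (fun e => (e.1.1 + wt, e.1.2 + vl))).Nodup →
      ∀ k, (s.foldl (pvStepB cw cv wt vl pr) bd).get? k
        = match s.find? (fun e => decide ((e.1.1 + wt, e.1.2 + vl) = k)) with
          | some e => if k.1 ≤ cw ∧ k.2 ≤ cv then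
              some (match bd.get? k with | none => e.2 + pr | some old => max old (e.2 + pr))
            else bd.get? k
          | none => bd.get? k := by
  intro s
  induction s with
  | nil => intro bd _ k; rfl
  | cons e t ih =>
    intro bd hnd k
    rw [List.map_cons] at hnd
    have hnd' : (t.map (fun e => (e.1.1 + wt, e.1.2 + vl))).Nodup := hnd.of_cons
    have hnotin : (e.1.1 + wt, e.1.2 + vl) ∉ t.map (fun e => (e.1.1 + wt, e.1.2 + vl)) :=
      (List.nodup_cons.mp hnd).1
    rw [List.foldl_cons, ih _ hnd' k]
    by_cases hek : (e.1.1 + wt, e.1.2 + vl) = k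
    · -- e is the (unique) entry targeting k; no entry of t targets k
      have hfind1 : (e :: t).find? (fun e => decide ((e.1.1 + wt, e.1.2 + vl) = k)) = some e :=
        List.find?_cons_of_pos (by simpa using hek)
      have hfindt : t.find? (fun e => decide ((e.1.1 + wt, e.1.2 + vl) = k)) = none := by
        rw [List.find?_eq_none]
        intro x hx
        simp only [decide_eq_true_eq]
        intro hc
        exact hnotin (hek ▸ hc ▸ List.mem_map_of_mem hx)
      simp only [hfindt, hfind1]
      subst hek
      unfold pvStepB
      by_cases hbox : e.1.1 + wt ≤ cw ∧ e.1.2 + vl ≤ cv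
      · rcases hget : bd.get? (e.1.1 + wt, e.1.2 + vl) with _ | old
        · simp [hget, hbox, PySem.Dict.get?_insert]
        · simp only [hget, if_pos hbox]
          by_cases hlt : old < e.2 + pr
          · simp [hlt, hbox, PySem.Dict.get?_insert]
            omega
          · simp [hlt, hget, hbox]
            omega
      · have hbox' : ¬((e.1.1 + wt, e.1.2 + vl).1 ≤ cw ∧ (e.1.1 + wt, e.1.2 + vl).2 ≤ cv) := hbox
        simp [hbox, hbox']
    · -- head does not target k
      have hfind : (e :: t).find? (fun e => decide ((e.1.1 + wt, e.1.2 + vl) = k))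
          = t.find? (fun e => decide ((e.1.1 + wt, e.1.2 + vl) = k)) :=
        List.find?_cons_of_neg (by simpa using hek)
      rw [hfind]
      have hsame : (pvStepB cw cv wt vl pr bd e).get? k = bd.get? k := by
        unfold pvStepB
        split
        · split
          · rw [PySem.Dict.get?_insert, if_neg (fun h => hek h.symm)]
          · split
            · rw [PySem.Dict.get?_insert, if_neg (fun h => hek h.symm)]
            · rfl
        · rfl
      rw [hsame]

theorem pvFind_shift (d : PySem.Dict (Int × Int) Int) (hnd : d.keys.Nodup) (wt vl : Int) (k : Int × Int) :
    d.items.find? (fun e => decide ((e.1.1 + wt, e.1.2 + vl) = k))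
      = (d.get? (k.1 - wt, k.2 - vl)).map (fun pv => ((k.1 - wt, k.2 - vl), pv)) := by
  have hpred : ∀ e : (Int × Int) × Int,
      (decide ((e.1.1 + wt, e.1.2 + vl) = k)) = (e.1 == (k.1 - wt, k.2 - vl)) := by
    intro e
    apply Bool.eq_iff_iff.mpr
    simp only [decide_eq_true_eq, beq_iff_eq, Prod.ext_iff]
    constructor <;> (intro h; exact ⟨by omega, by omega⟩)
  rw [show (fun e : (Int × Int) × Int => decide ((e.1.1 + wt, e.1.2 + vl) = k))
      = (fun e : (Int × Int) × Int => e.1 == (k.1 - wt, k.2 - vl)) from funext hpred]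
  -- now a plain association-list lookup
  rw [PySem.Dict.get?]
  generalize d.items = l
  induction l with
  | nil => rfl
  | cons e t ih =>
    by_cases he : e.1 == (k.1 - wt, k.2 - vl)
    · rw [List.find?_cons_of_pos (p := fun e : (Int × Int) × Int => e.1 == (k.1 - wt, k.2 - vl)) he]
      have h1 : e.1 = (k.1 - wt, k.2 - vl) := by simpa using he
      simp only [Option.map_some]
      exact congrArg some (Prod.ext h1 rfl)
    · rw [List.find?_cons_of_neg (p := fun e : (Int × Int) × Int => e.1 == (k.1 - wt, k.2 - vl)) he]
      exact ih

theorem pvTargets_nodup (d : PySem.Dict (Int × Int) Int) (hnd : d.keys.Nodup) (wt vl : Int) :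
    (d.items.map (fun e => (e.1.1 + wt, e.1.2 + vl))).Nodup := by
  have : d.items.map (fun e => (e.1.1 + wt, e.1.2 + vl))
      = (d.items.map (fun e => e.1)).map (fun k => (k.1 + wt, k.2 + vl)) := by
    simp [List.map_map, Function.comp]
  rw [this]
  apply List.Nodup.map _ hnd
  intro k1 k2 h
  have h1 : k1.1 + wt = k2.1 + wt := congrArg Prod.fst h
  have h2 : k1.2 + vl = k2.2 + vl := congrArg Prod.snd h
  exact Prod.ext (by omega) (by omega)

theorem pvStepB_nodup (cw cv wt vl pr : Int) :
    ∀ (s : List ((Int × Int) × Int)) (bd : PySem.Dict (Int × Int) Int),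
      bd.keys.Nodup → (s.foldl (pvStepB cw cv wt vl pr) bd).keys.Nodup := by
  intro s
  induction s with
  | nil => intro bd h; exact h
  | cons e t ih =>
    intro bd h
    rw [List.foldl_cons]
    apply ih
    unfold pvStepB
    split
    · split
      · exact PySem.Dict.nodup_keys_insert _ _ _ h
      · split
        · exact PySem.Dict.nodup_keys_insert _ _ _ h
        · exact h
    · exact h

-- final get?-level description of one dict item pass (the 'continue' guards already passed)
theorem pvItemB_get? (cw cv wt vl pr : Int) (d : PySem.Dict (Int × Int) Int) (hnd : d.keys.Nodup) (k : Int × Int) :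
    (d.items.foldl (pvStepB cw cv wt vl pr) d).get? k
      = match d.get? (k.1 - wt, k.2 - vl) with
        | some pv => if k.1 ≤ cw ∧ k.2 ≤ cv then
            some (match d.get? k with | none => pv + pr | some old => max old (pv + pr))
          else d.get? k
        | none => d.get? k := by
  rw [pvInnerB_char cw cv wt vl pr d.items d (pvTargets_nodup d hnd wt vl) k,
      pvFind_shift d hnd wt vl k]
  rcases d.get? (k.1 - wt, k.2 - vl) with _ | pv <;> rfl

-- ---- the joint invariant ----
def pvGoodI (cw cv a b : Int) : Prop := (a ≤ cw ∧ b ≤ cv) → (0 ≤ a ∧ 0 ≤ b)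

def pvInv (cw cv : Int) (dp : List (List Int)) (d : PySem.Dict (Int × Int) Int) : Prop :=
  pvShape cw cv dp ∧
  d.keys.Nodup ∧
  (∀ k ∈ d.keys, 0 ≤ k.1 ∧ k.1 ≤ cw ∧ 0 ≤ k.2 ∧ k.2 ≤ cv) ∧
  (∃ t, d.get? (0, 0) = some t ∧ 0 ≤ t) ∧
  (∀ w v, 0 ≤ w → w ≤ cw → 0 ≤ v → v ≤ cv → pvGet dp w v = pvMvle d w v)

theorem pvGetMem (d : PySem.Dict (Int × Int) Int) (k : Int × Int) (pv : Int)
    (h : d.get? k = some pv) : k ∈ d.keys := by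
  by_contra hk
  rw [(PySem.Dict.get?_eq_none_iff_not_mem_keys d k).mpr hk] at h
  cases h

theorem pvStep_inv (cw cv : Int) (hcw : 0 ≤ cw) (hcv : 0 ≤ cv)
    (weight volume price : List Int) (i : Int)
    (dp : List (List Int)) (d : PySem.Dict (Int × Int) Int)
    (hInv : pvInv cw cv dp d)
    (hG : pvGoodI cw cv (PySem.List.pyGetD weight i 0) (PySem.List.pyGetD volume i 0)) :
    pvInv cw cv
      (pvItemA cw cv (PySem.List.pyGetD weight i 0) (PySem.List.pyGetD volume i 0) (PySem.List.pyGetD price i 0) dp)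
      (pvItemB cw cv weight volume price d i) := by
  obtain ⟨hsh, hnd, hbounds, hzero, hP4⟩ := hInv
  set a := PySem.List.pyGetD weight i 0 with hA
  set b := PySem.List.pyGetD volume i 0 with hB
  set p := PySem.List.pyGetD price i 0 with hP
  by_cases h1 : cw < a
  · have hB0 : pvItemB cw cv weight volume price d i = d := by
      simp [pvItemB, ← hA, h1]
    rw [hB0]
    obtain ⟨hshout, hout⟩ := pvItemA_formula cw cv a b p (fun hm => absurd hm.1 (not_le.mpr h1)) dp hsh
    refine ⟨hshout, hnd, hbounds, hzero, ?_⟩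
    intro w v hw0 hwc hv0 hvc
    rw [hout w v hw0 hwc hv0 hvc, if_neg (by omega), hP4 w v hw0 hwc hv0 hvc]
  · by_cases h2 : cv < b
    · have hB0 : pvItemB cw cv weight volume price d i = d := by
        simp [pvItemB, ← hA, ← hB, h1, h2]
      rw [hB0]
      obtain ⟨hshout, hout⟩ := pvItemA_formula cw cv a b p (fun hm => absurd hm.2 (not_le.mpr h2)) dp hsh
      refine ⟨hshout, hnd, hbounds, hzero, ?_⟩
      intro w v hw0 hwc hv0 hvc
      rw [hout w v hw0 hwc hv0 hvc, if_neg (by omega), hP4 w v hw0 hwc hv0 hvc]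
    · obtain ⟨ha0, hb0⟩ := hG ⟨not_lt.mp h1, not_lt.mp h2⟩
      have hB0 : pvItemB cw cv weight volume price d i = d.items.foldl (pvStepB cw cv a b p) d := by
        simp [pvItemB, ← hA, ← hB, ← hP, h1, h2]
      rw [hB0]
      set d' := d.items.foldl (pvStepB cw cv a b p) d with hd'
      have hget' : ∀ k : Int × Int, d'.get? k
          = match d.get? (k.1 - a, k.2 - b) with
            | some pv => if k.1 ≤ cw ∧ k.2 ≤ cv then
                some (match d.get? k with | none => pv + p | some old => max old (pv + p))
              else d.get? k
            | none => d.get? k := fun k => pvItemB_get? cw cv a b p d hnd k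
      have hun : ∀ k : Int × Int, d.get? (k.1 - a, k.2 - b) = none → d'.get? k = d.get? k := by
        intro k h
        rw [hget' k, h]
      have hunbox : ∀ (k : Int × Int) (pv : Int), d.get? (k.1 - a, k.2 - b) = some pv →
          ¬(k.1 ≤ cw ∧ k.2 ≤ cv) → d'.get? k = d.get? k := by
        intro k pv h hbox
        rw [hget' k, h]
        simp only [if_neg hbox]
      have hnew1 : ∀ (k : Int × Int) (pv : Int), d.get? (k.1 - a, k.2 - b) = some pv →
          (k.1 ≤ cw ∧ k.2 ≤ cv) → d.get? k = none → d'.get? k = some (pv + p) := by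
        intro k pv h hbox h0
        rw [hget' k, h]
        simp only [if_pos hbox, h0]
      have hnew2 : ∀ (k : Int × Int) (pv old : Int), d.get? (k.1 - a, k.2 - b) = some pv →
          (k.1 ≤ cw ∧ k.2 ≤ cv) → d.get? k = some old → d'.get? k = some (max old (pv + p)) := by
        intro k pv old h hbox h0
        rw [hget' k, h]
        simp only [if_pos hbox, h0]
      obtain ⟨hshout, hout⟩ := pvItemA_formula cw cv a b p (fun _ => ⟨ha0, hb0⟩) dp hsh
      refine ⟨hshout, pvStepB_nodup cw cv a b p d.items d hnd, ?_, ?_, ?_⟩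
      · -- key bounds
        intro k hk
        have hkne : d'.get? k ≠ none := by
          intro hnone
          exact (PySem.Dict.get?_eq_none_iff_not_mem_keys d' k).mp hnone hk
        rcases hc : d.get? (k.1 - a, k.2 - b) with _ | pv
        · rw [hun k hc] at hkne
          rcases hck : d.get? k with _ | x
          · exact absurd hck hkne
          · exact hbounds k (pvGetMem d k x hck)
        · by_cases hbox : k.1 ≤ cw ∧ k.2 ≤ cv
          · have hmemc := hbounds _ (pvGetMem d _ pv hc)
            exact ⟨by omega, hbox.1, by omega, hbox.2⟩
          · rw [hunbox k pv hc hbox] at hkne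
            rcases hck : d.get? k with _ | x
            · exact absurd hck hkne
            · exact hbounds k (pvGetMem d k x hck)
      · -- the (0,0) entry stays present and nonnegative
        obtain ⟨t, hgt, ht⟩ := hzero
        by_cases hab : a = 0 ∧ b = 0
        · refine ⟨max t (t + p), ?_, by omega⟩
          have hzz : d.get? (((0:Int), (0:Int)).1 - a, ((0:Int), (0:Int)).2 - b) = some t := by
            obtain ⟨hz1, hz2⟩ := hab
            rw [show ((((0:Int), (0:Int)).1 - a, ((0:Int), (0:Int)).2 - b) : Int × Int) = ((0:Int), (0:Int)) by rw [hz1, hz2]; norm_num]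
            exact hgt
          exact hnew2 (0, 0) t t hzz ⟨hcw, hcv⟩ hgt
        · refine ⟨t, ?_, ht⟩
          have hnone : d.get? (((0:Int), (0:Int)).1 - a, ((0:Int), (0:Int)).2 - b) = none := by
            rcases hx : d.get? (((0:Int), (0:Int)).1 - a, ((0:Int), (0:Int)).2 - b) with _ | pv
            · rfl
            · exfalso
              have hmemc := hbounds _ (pvGetMem d _ pv hx)
              simp only at hmemc
              omega
          rw [hun (0, 0) hnone]
          exact hgt
      · -- the table reading
        intro w v hw0 hwc hv0 hvc
        rw [hout w v hw0 hwc hv0 hvc]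
        by_cases hfit : a ≤ w ∧ b ≤ v
        · rw [if_pos hfit, hP4 w v hw0 hwc hv0 hvc,
              hP4 (w - a) (v - b) (by omega) (by omega) (by omega) (by omega)]
          apply le_antisymm
          · apply max_le
            · -- old best values survive
              apply pvFoldMax_le (pvFoldMax_base_le _ _ _)
              intro c hcmem
              have hcb := pvMem_cells.mp hcmem
              have hbox : c.1 ≤ cw ∧ c.2 ≤ cv := ⟨by omega, by omega⟩
              rcases hcg : d.get? c with _ | old
              · rw [PySem.Dict.getD_eq_get?_getD, hcg]
                exact pvFoldMax_base_le _ _ _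
              · have hle : old ≤ d'.getD c 0 := by
                  rcases hcc : d.get? (c.1 - a, c.2 - b) with _ | pv
                  · rw [PySem.Dict.getD_eq_get?_getD, hun c hcc, hcg]
                    simp
                  · rw [PySem.Dict.getD_eq_get?_getD, hnew2 c pv old hcc hbox hcg]
                    simp only [Option.getD_some]
                    exact le_max_left _ _
                calc d.getD c 0 = old := by rw [PySem.Dict.getD_eq_get?_getD, hcg]; rfl
                  _ ≤ d'.getD c 0 := hle
                  _ ≤ (pvCells w v).foldl (fun m c => max m (d'.getD c 0)) 0 :=
                      pvFoldMax_le_of_mem hcmem _ 0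
            · -- the improved value is present at the shifted cell
              have hattain : ∃ c', c' ∈ pvCells (w - a) (v - b) ∧
                  d.get? c' = some (pvMvle d (w - a) (v - b)) := by
                obtain ⟨t, hgt, ht⟩ := hzero
                have hzmem : ((0:Int), (0:Int)) ∈ pvCells (w - a) (v - b) :=
                  pvMem_cells.mpr ⟨le_refl 0, by omega, le_refl 0, by omega⟩
                have htle : t ≤ pvMvle d (w - a) (v - b) := by
                  have := pvFoldMax_le_of_mem hzmem (fun c => d.getD c 0) 0
                  rwa [PySem.Dict.getD_eq_get?_getD, hgt] at this
                rcases pvFoldMax_attained (pvCells (w - a) (v - b)) (fun c => d.getD c 0) 0 with hat | ⟨c0, hc0mem, hat⟩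
                · refine ⟨(0, 0), hzmem, ?_⟩
                  rw [show pvMvle d (w - a) (v - b) = (pvCells (w - a) (v - b)).foldl (fun m c => max m (d.getD c 0)) 0 from rfl, hat] at htle ⊢
                  rw [hgt]
                  congr 1
                  omega
                · rcases hc0g : d.get? c0 with _ | pv
                  · refine ⟨(0, 0), hzmem, ?_⟩
                    have hz : d.getD c0 0 = 0 := by
                      rw [PySem.Dict.getD_eq_get?_getD, hc0g]; rfl
                    rw [show pvMvle d (w - a) (v - b) = (pvCells (w - a) (v - b)).foldl (fun m c => max m (d.getD c 0)) 0 from rfl, hat, hz] at htle ⊢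
                    rw [hgt]
                    congr 1
                    omega
                  · refine ⟨c0, hc0mem, ?_⟩
                    rw [hc0g]
                    congr 1
                    rw [show pvMvle d (w - a) (v - b) = (pvCells (w - a) (v - b)).foldl (fun m c => max m (d.getD c 0)) 0 from rfl, hat, PySem.Dict.getD_eq_get?_getD, hc0g]
                    rfl
              obtain ⟨c', hc'mem, hc'get⟩ := hattain
              have hc'b := pvMem_cells.mp hc'mem
              have hsh : d.get? ((c'.1 + a, c'.2 + b).1 - a, (c'.1 + a, c'.2 + b).2 - b)
                  = some (pvMvle d (w - a) (v - b)) := by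
                rw [show (((c'.1 + a, c'.2 + b).1 - a, (c'.1 + a, c'.2 + b).2 - b) : Int × Int) = c' from by simp]
                exact hc'get
              have hbox2 : (c'.1 + a, c'.2 + b).1 ≤ cw ∧ (c'.1 + a, c'.2 + b).2 ≤ cv :=
                ⟨by simp only; omega, by simp only; omega⟩
              have hk2get : ∃ val, d'.get? (c'.1 + a, c'.2 + b) = some val ∧
                  pvMvle d (w - a) (v - b) + p ≤ val := by
                rcases hk2old : d.get? (c'.1 + a, c'.2 + b) with _ | old
                · exact ⟨_, hnew1 _ _ hsh hbox2 hk2old, le_refl _⟩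
                · exact ⟨_, hnew2 _ _ _ hsh hbox2 hk2old, le_max_right _ _⟩
              obtain ⟨val, hval, hle⟩ := hk2get
              have hk2mem : (c'.1 + a, c'.2 + b) ∈ pvCells w v :=
                pvMem_cells.mpr ⟨by omega, by omega, by omega, by omega⟩
              calc pvMvle d (w - a) (v - b) + p ≤ val := hle
                _ = d'.getD (c'.1 + a, c'.2 + b) 0 := by
                    rw [PySem.Dict.getD_eq_get?_getD, hval]; rfl
                _ ≤ (pvCells w v).foldl (fun m c => max m (d'.getD c 0)) 0 :=
                    pvFoldMax_le_of_mem hk2mem _ 0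
          · -- every new cell value is bounded by the two old maxima
            apply pvFoldMax_le
            · exact le_trans (pvFoldMax_base_le _ _ _) (le_max_left _ _)
            · intro c hcmem
              have hcb := pvMem_cells.mp hcmem
              have hbox : c.1 ≤ cw ∧ c.2 ≤ cv := ⟨by omega, by omega⟩
              have hcle : d.getD c 0 ≤ pvMvle d w v := pvFoldMax_le_of_mem hcmem _ 0
              rcases hcc : d.get? (c.1 - a, c.2 - b) with _ | pv
              · rw [PySem.Dict.getD_eq_get?_getD, hun c hcc, ← PySem.Dict.getD_eq_get?_getD]
                exact le_trans hcle (le_max_left _ _)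
              · have hpv : pv ≤ pvMvle d (w - a) (v - b) := by
                  have hmemk := hbounds _ (pvGetMem d _ pv hcc)
                  have hcmem' : (c.1 - a, c.2 - b) ∈ pvCells (w - a) (v - b) :=
                    pvMem_cells.mpr ⟨by omega, by omega, by omega, by omega⟩
                  have := pvFoldMax_le_of_mem hcmem' (fun c => d.getD c 0) 0
                  rwa [PySem.Dict.getD_eq_get?_getD, hcc] at this
                rcases hcg : d.get? c with _ | old
                · rw [PySem.Dict.getD_eq_get?_getD, hnew1 c pv hcc hbox hcg]
                  simp only [Option.getD_some]
                  exact le_trans (by omega) (le_max_right _ _)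
                · rw [PySem.Dict.getD_eq_get?_getD, hnew2 c pv old hcc hbox hcg]
                  simp only [Option.getD_some]
                  apply max_le
                  · have hda : d.getD c 0 = old := by rw [PySem.Dict.getD_eq_get?_getD, hcg]; rfl
                    exact le_trans (hda ▸ hcle) (le_max_left _ _)
                  · exact le_trans (by omega) (le_max_right _ _)
        · rw [if_neg hfit, hP4 w v hw0 hwc hv0 hvc]
          unfold pvMvle
          apply PySem.List.foldl_congr_mem
          intro acc c hcmem
          have hcb := pvMem_cells.mp hcmem
          congr 1
          have hnone : d.get? (c.1 - a, c.2 - b) = none := by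
            rcases hx : d.get? (c.1 - a, c.2 - b) with _ | pv
            · rfl
            · exfalso
              have := hbounds _ (pvGetMem d _ pv hx)
              omega
          rw [PySem.Dict.getD_eq_get?_getD, PySem.Dict.getD_eq_get?_getD, hun c hnone]

theorem pvLoop_inv (cw cv : Int) (hcw : 0 ≤ cw) (hcv : 0 ≤ cv)
    (weight volume price : List Int) :
    ∀ (l : List Int) (dp : List (List Int)) (d : PySem.Dict (Int × Int) Int),
      pvInv cw cv dp d →
      (∀ i ∈ l, pvGoodI cw cv (PySem.List.pyGetD weight i 0) (PySem.List.pyGetD volume i 0)) →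
      pvInv cw cv
        (l.foldl (fun dp i => pvItemA cw cv (PySem.List.pyGetD weight i 0) (PySem.List.pyGetD volume i 0) (PySem.List.pyGetD price i 0) dp) dp)
        (l.foldl (pvItemB cw cv weight volume price) d) := by
  intro l
  induction l with
  | nil => intro dp d h _; exact h
  | cons i t ih =>
    intro dp d h hg
    rw [List.foldl_cons, List.foldl_cons]
    exact ih _ _ (pvStep_inv cw cv hcw hcv weight volume price i dp d h (hg i List.mem_cons_self))
      (fun j hj => hg j (List.mem_cons_of_mem _ hj))

theorem pvBase_inv (cw cv : Int) (hcw : 0 ≤ cw) (hcv : 0 ≤ cv) :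
    pvInv cw cv (List.replicate (cw + 1).toNat (List.replicate (cv + 1).toNat 0))
      (PySem.Dict.ofList [((0, 0), 0)]) := by
  have hit : (PySem.Dict.ofList [((0, 0), 0)] : PySem.Dict (Int × Int) Int).items
      = [(((0:Int), (0:Int)), (0:Int))] := by rfl
  have hget0 : ∀ c : Int × Int,
      (PySem.Dict.ofList [((0, 0), 0)] : PySem.Dict (Int × Int) Int).get? c
        = if ((0, 0) : Int × Int) = c then some 0 else none := by
    intro c
    rw [PySem.Dict.get?, hit]
    by_cases h : ((0, 0) : Int × Int) = c
    · rw [if_pos h]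
      rw [List.find?_cons_of_pos (by simpa using h)]
      rfl
    · rw [if_neg h]
      rw [List.find?_cons_of_neg (by simpa using h)]
      rfl
  have hgd0 : ∀ c : Int × Int,
      (PySem.Dict.ofList [((0, 0), 0)] : PySem.Dict (Int × Int) Int).getD c 0 = 0 := by
    intro c
    rw [PySem.Dict.getD_eq_get?_getD, hget0 c]
    split <;> rfl
  refine ⟨⟨List.length_replicate, ?_⟩, ?_, ?_, ⟨0, ?_, le_refl 0⟩, ?_⟩
  · intro r hr
    rw [List.eq_of_mem_replicate hr]
    exact List.length_replicate
  · rw [show (PySem.Dict.ofList [((0, 0), 0)] : PySem.Dict (Int × Int) Int).keys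
        = [((0:Int), (0:Int))] from by rw [PySem.Dict.keys, hit]; rfl]
    exact List.nodup_singleton _
  · intro k hk
    rw [show (PySem.Dict.ofList [((0, 0), 0)] : PySem.Dict (Int × Int) Int).keys
        = [((0:Int), (0:Int))] from by rw [PySem.Dict.keys, hit]; rfl] at hk
    rcases List.mem_singleton.mp hk with rfl
    exact ⟨le_refl 0, hcw, le_refl 0, hcv⟩
  · rw [hget0 (0, 0), if_pos rfl]
  · intro w v hw0 hwc hv0 hvc
    have hz : pvGet (List.replicate (cw + 1).toNat (List.replicate (cv + 1).toNat 0)) w v = 0 := by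
      unfold pvGet
      rw [List.getD_eq_getElem?_getD (l := List.replicate (cw + 1).toNat (List.replicate (cv + 1).toNat 0)) (i := w.toNat),
          List.getElem?_replicate,
          if_pos (show w.toNat < (cw + 1).toNat by omega)]
      simp only [Option.getD_some]
      rw [List.getD_eq_getElem?_getD (l := List.replicate (cv + 1).toNat (0 : Int)) (i := v.toNat),
          List.getElem?_replicate,
          if_pos (show v.toNat < (cv + 1).toNat by omega)]
      rfl
    rw [hz]
    apply le_antisymm
    · exact pvFoldMax_base_le _ _ 0
    · apply pvFoldMax_le (le_refl 0)
      intro c _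
      rw [hgd0 c]

theorem pvAnswer_eq (cw cv : Int) (hcw : 0 ≤ cw) (hcv : 0 ≤ cv)
    (dp : List (List Int)) (d : PySem.Dict (Int × Int) Int) (hInv : pvInv cw cv dp d) :
    (PySem.List.max? d.values id).getD 0 = pvMvle d cw cv := by
  obtain ⟨_, hnd, hbounds, ⟨t, hget0, ht0⟩, _⟩ := hInv
  have hmem_items : (((0:Int), (0:Int)), t) ∈ d.items :=
    PySem.Dict.mem_items_of_get?_eq_some d hget0
  have htval : t ∈ d.values := by
    rw [PySem.Dict.values]
    exact List.mem_map_of_mem hmem_items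
  rcases hmax : PySem.List.max? d.values id with _ | m
  · rw [(PySem.List.max?_eq_none_iff d.values id).mp hmax] at htval
    cases htval
  · have hmmem : m ∈ d.values := PySem.List.max?_mem hmax
    have hub : ∀ y ∈ d.values, y ≤ m := fun y hy => PySem.List.max?_isMax hmax y hy
    have h0m : (0:Int) ≤ m := le_trans ht0 (hub t htval)
    show m = pvMvle d cw cv
    apply le_antisymm
    · -- m is the value of some entry, whose key is a cell
      rw [PySem.Dict.values] at hmmem
      obtain ⟨⟨ek, ev⟩, hemem, hev⟩ := List.mem_map.mp hmmem
      have hkmem := PySem.Dict.mem_keys_of_mem_items d hemem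
      have hbk := hbounds _ hkmem
      have hcell : ek ∈ pvCells cw cv := pvMem_cells.mpr hbk
      have hgd : d.getD ek 0 = ev := PySem.Dict.getD_of_mem_items d hemem hnd 0
      calc m = ev := hev.symm
        _ = d.getD ek 0 := hgd.symm
        _ ≤ pvMvle d cw cv := pvFoldMax_le_of_mem hcell _ 0
    · apply pvFoldMax_le h0m
      intro c _
      rw [PySem.Dict.getD_eq_get?_getD]
      rcases hc : d.get? c with _ | x
      · exact h0m
      · have : x ∈ d.values := by
          rw [PySem.Dict.values]
          exact List.mem_map_of_mem (PySem.Dict.mem_items_of_get?_eq_some d hc)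
        exact hub x this

-- ===== VERDICT (by name: the statement is the Claim_ definition above) =====
theorem DPMultiKnapsack_spec : Claim_equal_DPMultiKnapsack := by
  intro items weight volume price capacity_w capacity_v _ hPre
  obtain ⟨hcw, hcv, hitems⟩ := hPre
  unfold Spec_DPMultiKnapsack
  have hgood : ∀ i ∈ PySem.List.pyRange 0 (items.length : Int) 1,
      pvGoodI capacity_w capacity_v (PySem.List.pyGetD weight i 0) (PySem.List.pyGetD volume i 0) := by
    intro i hi
    obtain ⟨hi0, hilt⟩ := PySem.List.mem_pyRange_one.mp hi
    have hlt : i.toNat < items.length := by omega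
    obtain ⟨hwlen, hrest⟩ := hitems i.toNat hlt
    intro ⟨hwle, hvle⟩
    rw [PySem.List.pyGetD_of_nonneg weight 0 hi0, PySem.List.pyGetD_of_nonneg volume 0 hi0] at *
    obtain ⟨hvlen, hrest2⟩ := hrest hwle
    obtain ⟨_, hw0, hv0⟩ := hrest2 hvle
    exact ⟨hw0, hv0⟩
  have hinv := pvLoop_inv capacity_w capacity_v hcw hcv weight volume price
    (PySem.List.pyRange 0 (items.length : Int) 1)
    (List.replicate (capacity_w + 1).toNat (List.replicate (capacity_v + 1).toNat 0))
    (PySem.Dict.ofList [((0, 0), 0)])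
    (pvBase_inv capacity_w capacity_v hcw hcv) hgood
  show pvGet ((PySem.List.pyRange 0 (items.length : Int) 1).foldl
      (fun dp i => pvItemA capacity_w capacity_v
        (PySem.List.pyGetD weight i 0) (PySem.List.pyGetD volume i 0) (PySem.List.pyGetD price i 0) dp)
      (List.replicate (capacity_w + 1).toNat (List.replicate (capacity_v + 1).toNat 0)))
      capacity_w capacity_v
    = (PySem.List.max? ((PySem.List.pyRange 0 (items.length : Int) 1).foldl
        (pvItemB capacity_w capacity_v weight volume price) (PySem.Dict.ofList [((0, 0), 0)])).values id).getD 0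
  rw [hinv.2.2.2.2 capacity_w capacity_v hcw (le_refl _) hcv (le_refl _),
      pvAnswer_eq capacity_w capacity_v hcw hcv _ _ hinv]
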